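-- pv_equiv track=rewrite | github.com/taco-taco-good/ai-agent-messaging | src/memory/resume_context.py | _last_role_entry
-- ===== SOURCE A (Python) =====
-- def _last_role_entry(body: str, role: str) -> str:
--     sections = []
--     current_role = ""
--     current_lines: list[str] = []
--     for line in body.splitlines():
--         if line.startswith("## "):
--             if current_role == role and current_lines:
--                 sections.append(" ".join(part.strip() for part in current_lines if part.strip()))
--             current_lines = []
--             current_role = role if line.strip().endswith(" {0}".format(role)) else ""
--             continue
--         if current_role == role:
--             current_lines.append(line)
--     if current_role == role and current_lines:
--         sections.append(" ".join(part.strip() for part in current_lines if part.strip()))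
--     if not sections:
--         return ""
--     summary = sections[-1].strip()
--     if len(summary) <= 300:
--         return summary
--     return summary[:297].rstrip() + "..."
-- ===== SOURCE B (Python) =====
-- def _last_role_entry(body: str, role: str) -> str:
--     # Two-phase: segment the body into (header, lines) blocks, then pick the
--     # last block whose header names the role and has at least one raw line.
--     blocks: list[tuple[str, list[str]]] = []
--     for line in body.splitlines():
--         if line.startswith("## "):
--             blocks.append((line, []))
--         elif blocks:
--             blocks[-1][1].append(line)
--     suffix = " " + role
--     candidates = [lines for header, lines in blocks
--                   if header.strip().endswith(suffix) and lines]
--     if not candidates: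
--         return ""
--     summary = " ".join(part.strip() for part in candidates[-1] if part.strip()).strip()
--     if len(summary) <= 300:
--         return summary
--     return summary[:297].rstrip() + "..."
-- ===== Notes on version B (the rewrite author's own statement) =====
-- stated objective: simpler
-- what changed: A interleaves role tracking, line collection and section flushing in one stateful loop; B first segments the body into (header, lines) blocks, then separately selects the last block whose header names the role and has lines, and summarises it.
-- intended difference: When role is the empty string and the body's last section has a non-blank line, A's "" sentinel for 'no current role' collides with the queried role and A returns joined text of sections no header names (even the preamble); B returns "", the intended value since no header can name the empty role. — e.g. on _last_role_entry("x", ""): A returns "x", B returns ""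
import Mathlib
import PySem

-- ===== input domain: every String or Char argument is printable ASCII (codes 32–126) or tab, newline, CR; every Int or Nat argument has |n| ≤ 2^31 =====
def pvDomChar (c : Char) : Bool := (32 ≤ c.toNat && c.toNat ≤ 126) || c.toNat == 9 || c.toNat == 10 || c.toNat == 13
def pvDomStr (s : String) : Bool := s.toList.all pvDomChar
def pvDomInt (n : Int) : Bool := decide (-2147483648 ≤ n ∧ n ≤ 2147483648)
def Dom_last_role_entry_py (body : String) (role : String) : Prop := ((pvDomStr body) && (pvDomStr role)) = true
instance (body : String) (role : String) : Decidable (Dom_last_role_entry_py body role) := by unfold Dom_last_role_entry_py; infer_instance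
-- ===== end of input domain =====

-- B re-implements A as a two-phase segmentation (blocks first, then selection of the last
-- qualifying one); the intended difference for the empty role is stated in D_ below.

-- ===== PORT A =====
def pvJoinA (ls : List String) : String :=
  PySem.Str.join " " ((ls.filter (fun p => !(PySem.Str.strip p == ""))).map PySem.Str.strip)

def pvTruncA (summary : String) : String :=
  if PySem.Str.len summary ≤ 300 then summary
  else PySem.Str.rstrip (PySem.Str.slice summary none (some 297)) ++ "..."

def pvStepA (role : String) (st : List String × String × List String) (line : String) :
    List String × String × List String :=
  let (secs, cur, curls) := st
  if PySem.Str.startswith line "## " then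
    ((if cur == role && !curls.isEmpty then secs ++ [pvJoinA curls] else secs),
     (if PySem.Str.endswith (PySem.Str.strip line) (" " ++ role) then role else ""),
     [])
  else if cur == role then (secs, cur, curls ++ [line])
  else (secs, cur, curls)

def last_role_entry_py (body : String) (role : String) : String :=
  let st := (PySem.Str.splitlines body).foldl (pvStepA role) ([], "", [])
  let secs := if st.2.1 == role && !st.2.2.isEmpty then st.1 ++ [pvJoinA st.2.2] else st.1
  match secs.getLast? with
  | none => ""
  | some last => pvTruncA (PySem.Str.strip last)

-- ===== PORT B =====
def pvJoinB (ls : List String) : String :=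
  PySem.Str.join " " ((ls.filter (fun p => !(PySem.Str.strip p == ""))).map PySem.Str.strip)

def pvTruncB (summary : String) : String :=
  if PySem.Str.len summary ≤ 300 then summary
  else PySem.Str.rstrip (PySem.Str.slice summary none (some 297)) ++ "..."

def pvStepB (bl : List (String × List String)) (line : String) : List (String × List String) :=
  if PySem.Str.startswith line "## " then bl ++ [(line, [])]
  else
    match bl.getLast? with
    | none => bl
    | some (h, ls) => bl.dropLast ++ [(h, ls ++ [line])]

def last_role_entry_py_alt (body : String) (role : String) : String :=
  let blocks := (PySem.Str.splitlines body).foldl pvStepB []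
  let candidates :=
    (blocks.filter (fun b =>
        PySem.Str.endswith (PySem.Str.strip b.1) (" " ++ role) && !b.2.isEmpty)).map (·.2)
  match candidates.getLast? with
  | none => ""
  | some ls => pvTruncB (PySem.Str.strip (pvJoinB ls))

-- ===== PRECONDITION & SPEC =====
-- When role = "" (and the last section of the body contains a non-blank line), A's "" sentinel
-- for "no current role" collides with the queried role, so A returns joined section text although
-- no header names the empty role; B returns "" there, the intended value.
def D_last_role_entry_py (body : String) (role : String) : Prop :=
  role = "" ∧
    ((((PySem.Str.splitlines body).reverse.dropWhile (fun l => PySem.Str.startswith l "## ")).takeWhile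
        (fun l => !(PySem.Str.startswith l "## "))).any
      (fun l => !(PySem.Str.strip l == ""))) = true
instance (body : String) (role : String) : Decidable (D_last_role_entry_py body role) := by
  unfold D_last_role_entry_py; infer_instance

def Spec_last_role_entry_py (body : String) (role : String) (out : String) : Prop :=
  ¬ D_last_role_entry_py body role → out = last_role_entry_py_alt body role
instance (body : String) (role : String) (out : String) : Decidable (Spec_last_role_entry_py body role out) := by
  unfold Spec_last_role_entry_py; infer_instance

def pvDiffWitness_last_role_entry_py : String × String := ("x", "")
def pvDiffWitnessOut_last_role_entry_py : String × String := ("x", "")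

-- ===== CLAIM (what is proved, stated in full; the proofs are below) =====
def Claim_unchanged_last_role_entry_py : Prop := ∀ (body : String) (role : String), Dom_last_role_entry_py body role → Spec_last_role_entry_py body role (last_role_entry_py body role)
def Claim_changed_last_role_entry_py : Prop := Dom_last_role_entry_py (pvDiffWitness_last_role_entry_py.1) (pvDiffWitness_last_role_entry_py.2) ∧ D_last_role_entry_py (pvDiffWitness_last_role_entry_py.1) (pvDiffWitness_last_role_entry_py.2) ∧ last_role_entry_py (pvDiffWitness_last_role_entry_py.1) (pvDiffWitness_last_role_entry_py.2) = pvDiffWitnessOut_last_role_entry_py.1 ∧ last_role_entry_py_alt (pvDiffWitness_last_role_entry_py.1) (pvDiffWitness_last_role_entry_py.2) = pvDiffWitnessOut_last_role_entry_py.2 ∧ pvDiffWitnessOut_last_role_entry_py.1 ≠ pvDiffWitnessOut_last_role_entry_py.2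
def Claim_exact_last_role_entry_py : Prop := ∀ (body : String) (role : String), Dom_last_role_entry_py body role → D_last_role_entry_py body role → last_role_entry_py body role ≠ last_role_entry_py_alt body role

-- ===== LEMMAS AND PROOFS =====

def pvQual (role h : String) : Bool := PySem.Str.endswith (PySem.Str.strip h) (" " ++ role)

def pvCands (role : String) (bl : List (String × List String)) : List (List String) :=
  (bl.filter (fun b => pvQual role b.1 && !b.2.isEmpty)).map (·.2)

def pvRel (role : String) (st : List String × String × List String)
    (bl : List (String × List String)) : Prop :=
  match bl.getLast? with
  | none => st = ([], "", [])
  | some (h, ls) =>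
      st.2.1 = (if pvQual role h then role else "") ∧
      st.2.2 = (if pvQual role h then ls else []) ∧
      st.1 = (pvCands role bl.dropLast).map pvJoinA

theorem pvCands_concat (role : String) (bl : List (String × List String)) (h : String) (ls : List String) :
    pvCands role (bl ++ [(h, ls)]) = pvCands role bl ++ (if pvQual role h && !ls.isEmpty then [ls] else []) := by
  by_cases hq : (pvQual role h && !ls.isEmpty) = true <;>
    simp [pvCands, List.filter_append, List.filter, hq]

theorem pvRel_step (role : String) (hr : role ≠ "") (st : List String × String × List String)
    (bl : List (String × List String)) (line : String) (hrel : pvRel role st bl) :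
    pvRel role (pvStepA role st line) (pvStepB bl line) := by
  obtain ⟨secs, cur, curls⟩ := st
  have hner : (("" : String) == role) = false := beq_eq_false_iff_ne.mpr (Ne.symm hr)
  by_cases hs : PySem.Str.startswith line "## " = true
  · -- header line
    have hB : pvStepB bl line = bl ++ [(line, [])] := by
      simp only [pvStepB, hs, reduceIte]
    rw [hB]
    simp only [pvRel, List.getLast?_concat, List.dropLast_concat]
    refine ⟨by simp only [pvStepA, hs, reduceIte]; rfl,
            by simp only [pvStepA, hs, reduceIte]; exact (ite_self _).symm, ?_⟩
    simp only [pvStepA, hs, reduceIte]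
    cases hbl : bl.getLast? with
    | none =>
      have hbe : bl = [] := List.getLast?_eq_none_iff.mp hbl
      simp only [pvRel, hbl, Prod.mk.injEq] at hrel
      obtain ⟨h1, h2, h3⟩ := hrel
      subst hbe
      simp [h1, h2, h3, hner, pvCands]
    | some pair =>
      obtain ⟨h, ls⟩ := pair
      simp only [pvRel, hbl] at hrel
      obtain ⟨hcur, hcl, hsecs⟩ := hrel
      obtain ⟨pre, hpre⟩ := List.getLast?_eq_some_iff.mp hbl
      have hdl : bl.dropLast = pre := by rw [hpre]; exact List.dropLast_concat
      rw [hpre, pvCands_concat, List.map_append, ← hdl]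
      cases hq : pvQual role h with
      | true =>
        rw [hq] at hcur hcl
        simp only [if_pos] at hcur hcl
        subst hcur hcl
        cases hle : curls.isEmpty with
        | true  => simp [hsecs]
        | false => simp [hsecs]
      | false =>
        rw [hq] at hcur hcl
        simp only [Bool.false_eq_true, if_false] at hcur hcl
        subst hcur hcl
        simp [hsecs, hner]
  · -- non-header line
    have hs' : PySem.Str.startswith line "## " = false := by
      cases hx : PySem.Str.startswith line "## " with
      | true => exact absurd hx hs
      | false => rfl
    cases hbl : bl.getLast? with
    | none =>
      have hbe : bl = [] := List.getLast?_eq_none_iff.mp hbl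
      simp only [pvRel, hbl, Prod.mk.injEq] at hrel
      obtain ⟨h1, h2, h3⟩ := hrel
      subst hbe h1 h2 h3
      have hB : pvStepB [] line = [] := by
        simp only [pvStepB, hs', Bool.false_eq_true, if_false, List.getLast?_nil]
      rw [hB]
      simp only [pvStepA, hs', Bool.false_eq_true, if_false, hner, pvRel, List.getLast?_nil]
    | some pair =>
      obtain ⟨h, ls⟩ := pair
      simp only [pvRel, hbl] at hrel
      obtain ⟨hcur, hcl, hsecs⟩ := hrel
      obtain ⟨pre, hpre⟩ := List.getLast?_eq_some_iff.mp hbl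
      have hdl : bl.dropLast = pre := by rw [hpre]; exact List.dropLast_concat
      have hB : pvStepB bl line = pre ++ [(h, ls ++ [line])] := by
        simp only [pvStepB, hs', Bool.false_eq_true, if_false, hbl, hdl]
      rw [hB]
      simp only [pvRel, List.getLast?_concat, List.dropLast_concat]
      cases hq : pvQual role h with
      | true =>
        rw [hq] at hcur hcl
        simp only [if_pos] at hcur hcl
        subst hcur hcl
        simp only [pvStepA, hs', Bool.false_eq_true, if_false, beq_self_eq_true, if_true]
        exact ⟨trivial, trivial, by rw [hsecs, hdl]⟩
      | false =>
        rw [hq] at hcur hcl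
        simp only [Bool.false_eq_true, if_false] at hcur hcl
        subst hcur hcl
        simp only [pvStepA, hs', Bool.false_eq_true, if_false, hner]
        exact ⟨trivial, trivial, by rw [hsecs, hdl]⟩

theorem pvRel_foldl (role : String) (hr : role ≠ "") (lines : List String)
    (st : List String × String × List String) (bl : List (String × List String))
    (hrel : pvRel role st bl) :
    pvRel role (lines.foldl (pvStepA role) st) (lines.foldl pvStepB bl) := by
  induction lines generalizing st bl with
  | nil => exact hrel
  | cons l rest ih => exact ih _ _ (pvRel_step role hr st bl l hrel)

theorem pv_eq_of_role_ne (body role : String) (hr : role ≠ "") :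
    last_role_entry_py body role = last_role_entry_py_alt body role := by
  have hner : (("" : String) == role) = false := beq_eq_false_iff_ne.mpr (Ne.symm hr)
  have hrel := pvRel_foldl role hr (PySem.Str.splitlines body) ([], "", []) [] (by
    simp only [pvRel, List.getLast?_nil])
  unfold last_role_entry_py last_role_entry_py_alt
  dsimp only
  set st := (PySem.Str.splitlines body).foldl (pvStepA role) ([], "", []) with hst
  set bl := (PySem.Str.splitlines body).foldl pvStepB [] with hbl
  have hcands : (bl.filter (fun b =>
        PySem.Str.endswith (PySem.Str.strip b.1) (" " ++ role) && !b.2.isEmpty)).map (·.2)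
      = pvCands role bl := rfl
  rw [hcands]
  cases hlast : bl.getLast? with
  | none =>
    have hbe : bl = [] := List.getLast?_eq_none_iff.mp hlast
    rw [hbe] at hrel ⊢
    simp only [pvRel, List.getLast?_nil] at hrel
    rw [hrel]
    simp [hner, pvCands]
  | some pair =>
    obtain ⟨h, ls⟩ := pair
    simp only [pvRel, hlast] at hrel
    obtain ⟨hcur, hcl, hsecs⟩ := hrel
    obtain ⟨pre, hpre⟩ := List.getLast?_eq_some_iff.mp hlast
    have hdl : bl.dropLast = pre := by rw [hpre]; exact List.dropLast_concat
    have hfin : (if st.2.1 == role && !st.2.2.isEmpty then st.1 ++ [pvJoinA st.2.2] else st.1)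
        = (pvCands role bl).map pvJoinA := by
      rw [hpre, pvCands_concat, List.map_append, ← hdl]
      cases hq : pvQual role h with
      | true =>
        rw [hq] at hcur hcl
        simp only [if_pos] at hcur hcl
        cases hle : st.2.2.isEmpty with
        | true  => simp [hcur, hsecs, ← hcl, List.isEmpty_iff.mp hle]
        | false => simp [hcur, hsecs, ← hcl, hle]
      | false =>
        rw [hq] at hcur hcl
        simp only [Bool.false_eq_true, if_false] at hcur hcl
        simp [hcur, hsecs, hner]
    rw [hfin, List.getLast?_map]
    cases hcl2 : (pvCands role bl).getLast? with
    | none => rfl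
    | some ls2 => rfl

theorem pv_mem_dropWhile {α : Type} (p : α → Bool) (l : List α) (a : α) (h : a ∈ l)
    (h2 : p a = false) : a ∈ l.dropWhile p := by
  induction l with
  | nil => simp at h
  | cons x xs ih =>
    by_cases hp : p x = true
    · rw [List.dropWhile_cons_of_pos hp]
      rcases List.mem_cons.mp h with he | hm
      · rw [he] at h2; rw [h2] at hp; exact absurd hp (by simp)
      · exact ih hm
    · rw [List.dropWhile_cons_of_neg hp]
      rcases List.mem_cons.mp h with he | hm
      · rw [he]; exact List.mem_cons_self
      · exact List.mem_cons_of_mem _ hm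

theorem pv_dropWhile_head {α : Type} (p : α → Bool) (l : List α) (a : α) (t : List α)
    (h : l.dropWhile p = a :: t) : p a = false := by
  induction l with
  | nil => simp at h
  | cons x xs ih =>
    by_cases hp : p x = true
    · rw [List.dropWhile_cons_of_pos hp] at h; exact ih h
    · rw [List.dropWhile_cons_of_neg hp] at h
      cases h; simpa using hp

theorem pvStrip_eq_nil_iff (cs : List Char) :
    PySem.Chars.strip cs = [] ↔ ∀ c ∈ cs, PySem.Chars.isspace c = true := by
  constructor
  · intro h c hc
    have h1 : ∀ c ∈ PySem.Chars.lstrip cs, PySem.Chars.isspace c = true := by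
      intro d hd
      have h0 : (List.dropWhile PySem.Chars.isspace (PySem.Chars.lstrip cs).reverse).reverse = [] := by
        simpa [PySem.Chars.strip, PySem.Chars.rstrip] using h
      have := List.reverse_eq_nil_iff.mp h0
      exact List.dropWhile_eq_nil_iff.mp this d (by simpa using hd)
    have hsplit := List.takeWhile_append_dropWhile (p := PySem.Chars.isspace) (l := cs)
    rw [← hsplit] at hc
    rcases List.mem_append.mp hc with hm | hm
    · exact List.mem_takeWhile_imp hm
    · exact h1 c hm
  · intro h
    have : PySem.Chars.lstrip cs = [] :=
      List.dropWhile_eq_nil_iff.mpr h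
    simp [PySem.Chars.strip, this, PySem.Chars.rstrip]

theorem pv_mem_strip (cs : List Char) (c : Char) (h : c ∈ cs)
    (hw : PySem.Chars.isspace c = false) : c ∈ PySem.Chars.strip cs := by
  have h1 : c ∈ PySem.Chars.lstrip cs := pv_mem_dropWhile _ _ _ h hw
  have h2 : c ∈ (PySem.Chars.lstrip cs).reverse := by simpa using h1
  have h3 := pv_mem_dropWhile PySem.Chars.isspace _ _ h2 hw
  simpa [PySem.Chars.strip, PySem.Chars.rstrip] using h3

theorem pv_endswith_strip_space (cs : List Char) :
    PySem.Chars.endswith (PySem.Chars.strip cs) [' '] = false := by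
  by_contra hx
  have hx' : PySem.Chars.endswith (PySem.Chars.strip cs) [' '] = true := eq_true_of_ne_false hx
  obtain ⟨t, ht⟩ := (PySem.Chars.endswith_iff _ _).mp hx'
  have hrev : (PySem.Chars.strip cs).reverse
      = (PySem.Chars.lstrip cs).reverse.dropWhile PySem.Chars.isspace := by
    simp [PySem.Chars.strip, PySem.Chars.rstrip]
  rw [← ht] at hrev
  rw [List.reverse_append] at hrev
  have : PySem.Chars.isspace ' ' = false := pv_dropWhile_head _ _ _ _ hrev.symm
  exact absurd this (by decide)

theorem pv_mem_join (sep : List Char) (parts : List (List Char)) (p : List Char) (c : Char)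
    (hp : p ∈ parts) (hc : c ∈ p) : c ∈ PySem.Chars.join sep parts := by
  have hmem : p ∈ parts.intersperse sep := by
    induction parts with
    | nil => simp at hp
    | cons q qs ih =>
      cases qs with
      | nil => simpa using hp
      | cons q2 qs2 =>
        rcases List.mem_cons.mp hp with he | hm
        · rw [List.intersperse_cons₂]; exact he ▸ List.mem_cons_self
        · rw [List.intersperse_cons₂]
          exact List.mem_cons_of_mem _ (List.mem_cons_of_mem _ (ih hm))
  exact List.mem_flatten_of_mem hmem hc

def pvIsH (l : String) : Bool := PySem.Str.startswith l "## "

def pvStepE (st : List (List String) × List String) (line : String) :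
    List (List String) × List String :=
  if pvIsH line then (st.1 ++ (if st.2.isEmpty then [] else [st.2]), [])
  else (st.1, st.2 ++ [line])

def pvFinE (st : List (List String) × List String) : List (List String) :=
  st.1 ++ (if st.2.isEmpty then [] else [st.2])

def pvLastSeg (lines : List String) : Option (List String) :=
  let r := (lines.reverse.dropWhile pvIsH).takeWhile (fun l => !pvIsH l)
  if r.isEmpty then none else some r.reverse

theorem pvRelE_foldl (lines : List String) (est : List (List String) × List String) :
    lines.foldl (pvStepA "") (est.1.map pvJoinA, "", est.2)
      = ((lines.foldl pvStepE est).1.map pvJoinA, "", (lines.foldl pvStepE est).2) := by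
  induction lines generalizing est with
  | nil => rfl
  | cons l rest ih =>
    have hstep : pvStepA "" (est.1.map pvJoinA, "", est.2) l
        = ((pvStepE est l).1.map pvJoinA, "", (pvStepE est l).2) := by
      by_cases hh : pvIsH l = true
      · have hh' : PySem.Str.startswith l "## " = true := hh
        simp only [pvStepA, pvStepE, hh, hh', reduceIte, beq_self_eq_true, Bool.true_and]
        refine Prod.ext ?_ (Prod.ext ?_ ?_)
        · cases est.2.isEmpty <;> simp
        · simp
        · simp
      · have hh' : PySem.Str.startswith l "## " = false := by
          cases hx : PySem.Str.startswith l "## " with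
          | true => exact absurd hx hh | false => rfl
        simp only [pvStepA, pvStepE, hh, hh', Bool.false_eq_true, if_false, beq_self_eq_true,
          if_true]
    rw [List.foldl_cons, List.foldl_cons, hstep, ih (pvStepE est l)]

theorem pvE2 (lines : List String) :
    (lines.foldl pvStepE ([], [])).2 = (lines.reverse.takeWhile (fun l => !pvIsH l)).reverse
    ∧ (pvFinE (lines.foldl pvStepE ([], []))).getLast? = pvLastSeg lines := by
  induction lines using List.reverseRecOn with
  | nil => exact ⟨rfl, rfl⟩
  | append_singleton init l ih =>
    obtain ⟨ih1, ih2⟩ := ih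
    rw [List.foldl_append, List.foldl_cons, List.foldl_nil]
    by_cases hh : pvIsH l = true
    · constructor
      · simp [pvStepE, hh, List.reverse_append]
      · have hfin : pvFinE (pvStepE (init.foldl pvStepE ([], [])) l)
            = pvFinE (init.foldl pvStepE ([], [])) := by
          simp [pvStepE, pvFinE, hh]
        rw [hfin, ih2]
        have : pvLastSeg (init ++ [l]) = pvLastSeg init := by
          simp [pvLastSeg, List.reverse_append, hh]
        rw [this]
    · have hh' : (!pvIsH l) = true := by simp [hh]
      constructor
      · simp [pvStepE, hh, List.reverse_append, ih1]
      · have hfin : pvFinE (pvStepE (init.foldl pvStepE ([], [])) l)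
            = (init.foldl pvStepE ([], [])).1 ++ [(init.foldl pvStepE ([], [])).2 ++ [l]] := by
          simp [pvStepE, pvFinE, hh]
        rw [hfin, List.getLast?_concat]
        simp [pvLastSeg, List.reverse_append, hh, ih1]

theorem pvA_empty (body : String) :
    last_role_entry_py body "" =
      (match pvLastSeg (PySem.Str.splitlines body) with
       | none => ""
       | some r => pvTruncA (PySem.Str.strip (pvJoinA r))) := by
  unfold last_role_entry_py
  dsimp only
  have h0 := pvRelE_foldl (PySem.Str.splitlines body) ([], [])
  simp only [List.map_nil] at h0
  rw [h0]
  obtain ⟨-, h2⟩ := pvE2 (PySem.Str.splitlines body)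
  set e := (PySem.Str.splitlines body).foldl pvStepE ([], []) with he
  have hfin : (if ("" == "" && !e.2.isEmpty) = true then e.1.map pvJoinA ++ [pvJoinA e.2] else e.1.map pvJoinA)
      = (pvFinE e).map pvJoinA := by
    cases hq : e.2.isEmpty <;> simp [pvFinE, hq]
  rw [hfin, List.getLast?_map, h2]
  cases pvLastSeg (PySem.Str.splitlines body) <;> rfl

theorem pvB_empty (body : String) : last_role_entry_py_alt body "" = "" := by
  unfold last_role_entry_py_alt
  dsimp only
  have hfil : ((PySem.Str.splitlines body).foldl pvStepB []).filter (fun b =>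
      PySem.Str.endswith (PySem.Str.strip b.1) (" " ++ "") && !b.2.isEmpty) = [] := by
    refine List.filter_eq_nil_iff.mpr (fun b _ => ?_)
    simp [pv_endswith_strip_space b.1.toList]
  rw [hfil]
  rfl

theorem pvJoin_blank (ls : List String) (h : ∀ p ∈ ls, PySem.Str.strip p = "") :
    pvJoinA ls = "" := by
  have hf : ls.filter (fun p => !(PySem.Str.strip p == "")) = [] := by
    refine List.filter_eq_nil_iff.mpr (fun p hp => ?_)
    simp [h p hp]
  rw [pvJoinA, hf]
  decide

theorem pv_unchanged_empty (body : String)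
    (hnd : (((PySem.Str.splitlines body).reverse.dropWhile (fun l => PySem.Str.startswith l "## ")).takeWhile
        (fun l => !(PySem.Str.startswith l "## "))).any (fun l => !(PySem.Str.strip l == "")) = false) :
    last_role_entry_py body "" = last_role_entry_py_alt body "" := by
  have hnd' : (((PySem.Str.splitlines body).reverse.dropWhile pvIsH).takeWhile
      (fun l => !pvIsH l)).any (fun l => !(PySem.Str.strip l == "")) = false := hnd
  rw [pvB_empty, pvA_empty]
  have hblank : ∀ l ∈ ((PySem.Str.splitlines body).reverse.dropWhile pvIsH).takeWhile
      (fun l => !pvIsH l), PySem.Str.strip l = "" := by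
    intro l hl
    have := List.any_eq_false.mp hnd' l hl
    simpa using this
  cases hseg : pvLastSeg (PySem.Str.splitlines body) with
  | none => rfl
  | some r =>
    have hr : r = (((PySem.Str.splitlines body).reverse.dropWhile pvIsH).takeWhile
        (fun l => !pvIsH l)).reverse := by
      by_cases he : (((PySem.Str.splitlines body).reverse.dropWhile pvIsH).takeWhile
          (fun l => !pvIsH l)).isEmpty = true
      · rw [pvLastSeg] at hseg; simp [he] at hseg
      · rw [pvLastSeg] at hseg
        simp only [he, Bool.false_eq_true, if_false, Option.some.injEq] at hseg
        exact hseg.symm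
    have hj : pvJoinA r = "" := by
      refine pvJoin_blank r (fun p hp => ?_)
      exact hblank p (by rw [hr] at hp; simpa using hp)
    show pvTruncA (PySem.Str.strip (pvJoinA r)) = ""
    rw [hj]
    decide

theorem pvA_ne_empty (body : String)
    (hany : (((PySem.Str.splitlines body).reverse.dropWhile (fun l => PySem.Str.startswith l "## ")).takeWhile
        (fun l => !(PySem.Str.startswith l "## "))).any (fun l => !(PySem.Str.strip l == "")) = true) :
    last_role_entry_py body "" ≠ "" := by
  have hany' : (((PySem.Str.splitlines body).reverse.dropWhile pvIsH).takeWhile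
      (fun l => !pvIsH l)).any (fun l => !(PySem.Str.strip l == "")) = true := hany
  rw [pvA_empty]
  obtain ⟨l, hl, hnb⟩ := List.any_eq_true.mp hany'
  have hnb' : PySem.Str.strip l ≠ "" := by simpa using hnb
  set tw := ((PySem.Str.splitlines body).reverse.dropWhile pvIsH).takeWhile (fun l => !pvIsH l) with htw
  have hne : tw.isEmpty = false := by
    cases hx : tw.isEmpty
    · rfl
    · rw [List.isEmpty_iff.mp hx] at hl; simp at hl
  have hseg : pvLastSeg (PySem.Str.splitlines body) = some tw.reverse := by
    rw [pvLastSeg]; simp [← htw, hne]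
  rw [hseg]
  -- the joined summary contains a non-whitespace character
  obtain ⟨c, hcmem, hcw⟩ : ∃ c ∈ l.toList, PySem.Chars.isspace c = false := by
    by_contra hall
    push Not at hall
    have : PySem.Chars.strip l.toList = [] := by
      refine (pvStrip_eq_nil_iff _).mpr (fun c hc => ?_)
      have := hall c hc
      cases hx : PySem.Chars.isspace c
      · exact absurd hx this
      · rfl
    exact hnb' (by
      have h2 : (PySem.Str.strip l).toList = [] := by simpa using this
      exact String.toList_inj.mp (by simpa using h2))
  have hlmem : l ∈ tw.reverse := by simpa using hl
  have hfil : l ∈ tw.reverse.filter (fun p => !(PySem.Str.strip p == "")) := by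
    refine List.mem_filter.mpr ⟨hlmem, by simpa using hnb'⟩
  have hparts : (PySem.Str.strip l).toList ∈ ((tw.reverse.filter
      (fun p => !(PySem.Str.strip p == ""))).map PySem.Str.strip).map String.toList :=
    List.mem_map_of_mem (List.mem_map_of_mem hfil)
  have hcs : c ∈ (PySem.Str.strip l).toList := by
    have := pv_mem_strip l.toList c hcmem hcw
    simpa using this
  have hcj : c ∈ (pvJoinA tw.reverse).toList := by
    rw [pvJoinA]
    rw [PySem.Str.toList_join]
    exact pv_mem_join _ _ _ c (by simpa [List.map_map] using hparts) hcs
  have hsum : (PySem.Str.strip (pvJoinA tw.reverse)).toList ≠ [] := by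
    intro h0
    have : PySem.Chars.strip (pvJoinA tw.reverse).toList = [] := by simpa using h0
    have hws := (pvStrip_eq_nil_iff _).mp this c hcj
    rw [hcw] at hws
    exact absurd hws (by simp)
  set summary := PySem.Str.strip (pvJoinA tw.reverse) with hsumdef
  show pvTruncA summary ≠ ""
  rw [pvTruncA]
  by_cases hlen : PySem.Str.len summary ≤ 300
  · simp only [hlen, if_pos]
    intro h0
    exact hsum (by rw [h0]; rfl)
  · simp only [hlen, if_false]
    intro h0
    have := congrArg String.toList h0
    rw [String.toList_append] at this
    simp at this

-- ===== VERDICT (by name: the statement is the Claim_ definition above) =====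
theorem last_role_entry_py_spec : Claim_unchanged_last_role_entry_py := by
  intro body role _ hnd
  by_cases hr : role = ""
  · subst hr
    apply pv_unchanged_empty
    cases hx : (((PySem.Str.splitlines body).reverse.dropWhile
        (fun l => PySem.Str.startswith l "## ")).takeWhile
        (fun l => !(PySem.Str.startswith l "## "))).any (fun l => !(PySem.Str.strip l == "")) with
    | false => rfl
    | true => exact absurd (⟨rfl, hx⟩ : D_last_role_entry_py body "") hnd
  · exact pv_eq_of_role_ne body role hr

theorem last_role_entry_py_changed : Claim_changed_last_role_entry_py := by
  unfold Claim_changed_last_role_entry_py; decide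

theorem last_role_entry_py_tight : Claim_exact_last_role_entry_py := by
  intro body role _ hd
  obtain ⟨hr, hany⟩ := hd
  subst hr
  rw [pvB_empty]
  exact pvA_ne_empty body hany
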